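-- pv_equiv track=rewrite | github.com/williamdarkocode/AlgortithmsAndDataStructures | Python_Algos_Datastructstures/netflixcodesignal.py | bubblesSolution
-- ===== SOURCE A (Python) =====
-- def bubblesSolution(bubbles:list):
--     coords = set()
--     for i in range(len(bubbles)):
--         for j in range(len(bubbles[0])):
--             cur = bubbles[i][j]
--             neighbours = []
--             if i+1 < len(bubbles) and bubbles[i+1][j] == cur:
--                 neighbours.append((i+1,j))
--             if i-1 >= 0 and bubbles[i-1][j] == cur:
--                 neighbours.append((i-1,j))
--             if j+1 < len(bubbles[0]) and bubbles[i][j+1] == cur: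
--                 neighbours.append((i,j+1))
--             if j-1 >= 0 and bubbles[i][j-1] == cur:
--                 neighbours.append((i,j-1))
--
--             if len(neighbours) >=2:
--                 neighbours.append((i,j))
--                 coords.update(neighbours)
--
--     for pair in coords:
--         bubbles[pair[0]][pair[1]] = 0
--
--
--     for col in range(len(bubbles[0])):
--         for row in range(len(bubbles)-1,-1,-1):
--             if bubbles[row][col] == 0:
--                 i = row
--                 while i > 0 and bubbles[i][col] == 0:
--                     i-=1
--
--                 bubbles[row][col] = bubbles[i][col]
--                 bubbles[i][col] = 0
--
--     return bubbles
-- ===== SOURCE B (Python) =====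
-- # B: functional pop-then-gravity. Popping is computed as a pure predicate (a cell pops
-- # iff it is a >=2-neighbour centre or an equal-valued neighbour of one); gravity is done
-- # per column by filtering the non-zero entries and padding zeros on top (one pass per
-- # column instead of A's nested bottom-up scan). B does not mutate its argument.
-- def bubblesSolution(bubbles: list):
--     h, w = len(bubbles), len(bubbles[0])
--
--     def is_center(i, j):
--         cur = bubbles[i][j]
--         cnt = 0
--         if i + 1 < h and bubbles[i + 1][j] == cur: cnt += 1
--         if i > 0 and bubbles[i - 1][j] == cur: cnt += 1
--         if j + 1 < w and bubbles[i][j + 1] == cur: cnt += 1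
--         if j > 0 and bubbles[i][j - 1] == cur: cnt += 1
--         return cnt >= 2
--
--     center = [[is_center(i, j) for j in range(w)] for i in range(h)]
--
--     def popped(i, j):
--         if center[i][j]:
--             return True
--         cur = bubbles[i][j]
--         if i + 1 < h and center[i + 1][j] and bubbles[i + 1][j] == cur: return True
--         if i > 0 and center[i - 1][j] and bubbles[i - 1][j] == cur: return True
--         if j + 1 < w and center[i][j + 1] and bubbles[i][j + 1] == cur: return True
--         if j > 0 and center[i][j - 1] and bubbles[i][j - 1] == cur: return True
--         return False
--
--     g = [[0 if popped(i, j) else bubbles[i][j] for j in range(w)] for i in range(h)]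
--
--     cols = []
--     for j in range(w):
--         kept = [g[i][j] for i in range(h) if g[i][j] != 0]
--         cols.append([0] * (h - len(kept)) + kept)
--
--     return [[cols[j][i] for j in range(w)] for i in range(h)]
-- ===== Notes on version B (the rewrite author's own statement) =====
-- stated objective: alternative
-- what changed: Popping becomes a pure two-stage predicate (centre mask, then neighbour expansion) instead of an accumulated coordinate set mutated into the grid, and gravity becomes a single filter-and-pad pass per column instead of A's bottom-up row loop with an inner upward while-scan; B builds a new grid rather than mutating its argument in place.
-- outside the precondition, e.g. on bubblesSolution([[1], [2, 3]]): A returns [[1], [2, 3]], B returns [[1], [2]]; on bubblesSolution([]): A raises IndexError, B raises IndexError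
import Mathlib
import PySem

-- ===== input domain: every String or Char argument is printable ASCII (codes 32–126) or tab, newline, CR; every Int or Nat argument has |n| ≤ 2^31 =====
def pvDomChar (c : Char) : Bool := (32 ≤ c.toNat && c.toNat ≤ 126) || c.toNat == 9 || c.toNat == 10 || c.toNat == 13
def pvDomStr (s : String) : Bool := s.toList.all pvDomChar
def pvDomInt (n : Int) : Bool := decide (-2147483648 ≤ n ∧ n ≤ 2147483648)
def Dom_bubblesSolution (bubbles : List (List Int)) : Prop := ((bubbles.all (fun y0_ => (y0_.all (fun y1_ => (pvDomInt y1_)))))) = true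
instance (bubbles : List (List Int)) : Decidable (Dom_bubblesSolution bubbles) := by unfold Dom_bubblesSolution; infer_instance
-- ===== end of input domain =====

-- B pops bubbles with a pure two-stage predicate and does gravity by filter-and-pad per
-- column (one pass) instead of A's coordinate-set mutation and bottom-up while-scans;
-- equivalence is about the RETURN value only: A mutates its argument in place, B does not.

-- shared subscript helper: g[i][j] (used by both ports; indices are in range under Pre_)
def pvAt (g : List (List Int)) (i j : Nat) : Int := (g.getD i []).getD j 0

-- ===== PORT A =====
def pvSetA (g : List (List Int)) (i j : Nat) (v : Int) : List (List Int) :=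
  g.set i ((g.getD i []).set j v)

-- the `neighbours` list built for cell (i,j), in A's append order
def pvNbrsA (g : List (List Int)) (h w i j : Nat) : List (Nat × Nat) :=
  (if i+1 < h && (pvAt g (i+1) j == pvAt g i j) then [(i+1, j)] else []) ++
  (if 0 < i && (pvAt g (i-1) j == pvAt g i j) then [(i-1, j)] else []) ++
  (if j+1 < w && (pvAt g i (j+1) == pvAt g i j) then [(i, j+1)] else []) ++
  (if 0 < j && (pvAt g i (j-1) == pvAt g i j) then [(i, j-1)] else [])

def pvCoordsA (g : List (List Int)) (h w : Nat) : PySem.Set (Nat × Nat) :=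
  (List.range h).foldl (fun s i =>
    (List.range w).foldl (fun s j =>
      let ns := pvNbrsA g h w i j
      if 2 ≤ ns.length then PySem.Set.update s (ns ++ [(i, j)]) else s) s) PySem.Set.empty

-- `i = row; while i > 0 and bubbles[i][col] == 0: i -= 1`
def pvWhileUpA (g : List (List Int)) (col : Nat) : Nat → Nat
  | 0 => 0
  | i+1 => if pvAt g (i+1) col == 0 then pvWhileUpA g col i else i+1

def pvGravStepA (col : Nat) (g : List (List Int)) (row : Nat) : List (List Int) :=
  if pvAt g row col == 0 then
    let i := pvWhileUpA g col row
    pvSetA (pvSetA g row col (pvAt g i col)) i col 0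
  else g

def bubblesSolution (bubbles : List (List Int)) : List (List Int) :=
  let h := bubbles.length
  let w := (bubbles.getD 0 []).length
  let coords := pvCoordsA bubbles h w
  let g1 := coords.foldl (fun g p => pvSetA g p.1 p.2 0) bubbles
  (List.range w).foldl (fun g col =>
    ((List.range h).reverse).foldl (pvGravStepA col) g) g1

-- ===== PORT B =====
def pvIsCenterB (bubbles : List (List Int)) (h w i j : Nat) : Bool :=
  let cur := pvAt bubbles i j
  let cnt : Nat :=
    (if i+1 < h && (pvAt bubbles (i+1) j == cur) then 1 else 0) +
    (if 0 < i && (pvAt bubbles (i-1) j == cur) then 1 else 0) +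
    (if j+1 < w && (pvAt bubbles i (j+1) == cur) then 1 else 0) +
    (if 0 < j && (pvAt bubbles i (j-1) == cur) then 1 else 0)
  2 ≤ cnt

def pvCtrAt (center : List (List Bool)) (i j : Nat) : Bool := (center.getD i []).getD j false

-- Source B's early-return `popped` chain as one boolean disjunction
def pvPoppedB (bubbles : List (List Int)) (center : List (List Bool)) (h w i j : Nat) : Bool :=
  let cur := pvAt bubbles i j
  pvCtrAt center i j ||
  (decide (i+1 < h) && pvCtrAt center (i+1) j && (pvAt bubbles (i+1) j == cur)) ||
  (decide (0 < i) && pvCtrAt center (i-1) j && (pvAt bubbles (i-1) j == cur)) ||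
  (decide (j+1 < w) && pvCtrAt center i (j+1) && (pvAt bubbles i (j+1) == cur)) ||
  (decide (0 < j) && pvCtrAt center i (j-1) && (pvAt bubbles i (j-1) == cur))

def bubblesSolution_alt (bubbles : List (List Int)) : List (List Int) :=
  let h := bubbles.length
  let w := (bubbles.getD 0 []).length
  let center := (List.range h).map (fun i => (List.range w).map (fun j => pvIsCenterB bubbles h w i j))
  let g := (List.range h).map (fun i => (List.range w).map (fun j =>
      if pvPoppedB bubbles center h w i j then 0 else pvAt bubbles i j))
  let cols := (List.range w).map (fun j =>
      let kept := ((List.range h).map (fun i => pvAt g i j)).filter (fun v => !(v == 0))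
      List.replicate (h - kept.length) 0 ++ kept)
  (List.range h).map (fun i => (List.range w).map (fun j => (cols.getD j []).getD i 0))

-- ===== PRECONDITION & SPEC =====
-- Pre_ excludes the empty grid, on which A raises IndexError evaluating bubbles[0], and
-- ragged grids: rows shorter than row 0 make A raise IndexError, and on rows longer than
-- row 0 A silently ignores (and returns) the cells beyond row 0's width — a shape no
-- caller of this rectangular-board puzzle supplies.
def Pre_bubblesSolution (bubbles : List (List Int)) : Prop :=
  bubbles ≠ [] ∧ ∀ r ∈ bubbles, r.length = (bubbles.getD 0 []).length
instance (bubbles : List (List Int)) : Decidable (Pre_bubblesSolution bubbles) := by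
  unfold Pre_bubblesSolution; infer_instance

def pvWitness_bubblesSolution : List (List Int) := [[1, 2], [1, 1]]

def Spec_bubblesSolution (bubbles : List (List Int)) (out : List (List Int)) : Prop := out = bubblesSolution_alt bubbles
instance (bubbles : List (List Int)) (out : List (List Int)) : Decidable (Spec_bubblesSolution bubbles out) := by unfold Spec_bubblesSolution; infer_instance

-- ===== CLAIM (what is proved, stated in full; the proofs are below) =====
def Claim_equal_bubblesSolution : Prop := ∀ (bubbles : List (List Int)), Dom_bubblesSolution bubbles → Pre_bubblesSolution bubbles → Spec_bubblesSolution bubbles (bubblesSolution bubbles)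

-- ===== LEMMAS AND PROOFS =====

-- proof-side notions: columns, the pure per-column gravity loop, and zero-compaction
def colOf (g : List (List Int)) (j : Nat) : List Int := g.map (fun r => r.getD j 0)

def wUp (c : List Int) : Nat → Nat
  | 0 => 0
  | i+1 => if c.getD (i+1) 0 == 0 then wUp c i else i+1

def stepC (c : List Int) (row : Nat) : List Int :=
  if c.getD row 0 == 0 then
    (c.set row (c.getD (wUp c row) 0)).set (wUp c row) 0
  else c

def FC (c : List Int) (m : Nat) : List Int := ((List.range m).reverse).foldl stepC c

def nzf (c : List Int) : List Int := c.filter (fun v => !(v == 0))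

def zcomp (c : List Int) : List Int :=
  List.replicate (c.length - (nzf c).length) 0 ++ nzf c

def Shp (g : List (List Int)) (h w : Nat) : Prop :=
  g.length = h ∧ ∀ r ∈ g, r.length = w

-- ---- basic indexing ----
lemma getD_eq_getElem_of_lt {α : Type} (l : List α) (d : α) {i : Nat} (h : i < l.length) :
    l.getD i d = l[i] := by
  simp [List.getD_eq_getElem?_getD, List.getElem?_eq_getElem, h]

lemma colOf_getD (g : List (List Int)) (j i : Nat) :
    (colOf g j).getD i 0 = pvAt g i j := by
  simp only [colOf, pvAt, List.getD_eq_getElem?_getD, List.getElem?_map]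
  cases hg : g[i]? with
  | none => simp
  | some r => simp

lemma pvAt_eq_getElem (g : List (List Int)) (i j : Nat) (hi : i < g.length)
    (hj : j < g[i].length) : pvAt g i j = g[i][j] := by
  simp [pvAt, List.getD_eq_getElem?_getD, hi, hj]

lemma length_colOf (g : List (List Int)) (j : Nat) : (colOf g j).length = g.length := by
  simp [colOf]

-- ---- pvSetA shape and values ----
lemma length_pvSetA (g : List (List Int)) (i j : Nat) (v : Int) :
    (pvSetA g i j v).length = g.length := by simp [pvSetA]

lemma rows_pvSetA (g : List (List Int)) (i j k : Nat) (v : Int) :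
    ((pvSetA g i j v).getD k []).length = (g.getD k []).length := by
  simp only [pvSetA, List.getD_eq_getElem?_getD]
  by_cases hik : i = k
  · subst hik
    by_cases hi : i < g.length
    · simp [List.getElem?_set_self hi, List.getElem?_eq_getElem, hi]
    · rw [List.getElem?_set]; simp [hi]
  · rw [List.getElem?_set_ne hik]

lemma shp_pvSetA (g : List (List Int)) (h w i j : Nat) (v : Int) (hs : Shp g h w) :
    Shp (pvSetA g i j v) h w := by
  obtain ⟨h1, h2⟩ := hs
  refine ⟨by simp [pvSetA, h1], ?_⟩
  intro r hr
  by_cases hi : i < g.length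
  · rcases List.mem_or_eq_of_mem_set hr with hr' | rfl
    · exact h2 r hr'
    · rw [List.length_set, getD_eq_getElem_of_lt _ _ hi]
      exact h2 _ (List.getElem_mem hi)
  · rw [pvSetA, List.set_eq_of_length_le (by omega)] at hr
    exact h2 r hr

lemma pvAt_pvSetA (g : List (List Int)) (i j a b : Nat) (v : Int)
    (hi : i < g.length) (hj : j < (g.getD i []).length) :
    pvAt (pvSetA g i j v) a b = if a = i ∧ b = j then v else pvAt g a b := by
  rw [getD_eq_getElem_of_lt _ _ hi] at hj
  simp only [pvAt, pvSetA, List.getD_eq_getElem?_getD]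
  by_cases hai : a = i
  · subst hai
    rw [List.getElem?_set_self (by simpa using hi)]
    simp only [Option.getD_some]
    rw [List.getElem?_eq_getElem hi, Option.getD_some]
    by_cases hbj : b = j
    · subst hbj
      simp [List.getElem?_set_self hj]
    · rw [List.getElem?_set_ne (by omega)]
      simp [hbj, List.getD_eq_getElem?_getD, List.getElem?_eq_getElem, hi]
  · rw [List.getElem?_set_ne (by omega)]
    simp [hai]

-- ---- membership in A's coordinate set ----
lemma mem_foldl_grow {α β : Type} [BEq α] [LawfulBEq α]
    (g : β → PySem.Set α → PySem.Set α) (Q : β → α → Prop)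
    (H : ∀ x s y, y ∈ g x s ↔ y ∈ s ∨ Q x y) :
    ∀ (xs : List β) (s : PySem.Set α) (y : α),
      y ∈ xs.foldl (fun s x => g x s) s ↔ y ∈ s ∨ ∃ x ∈ xs, Q x y := by
  intro xs
  induction xs with
  | nil => simp
  | cons x xs ih =>
    intro s y
    rw [List.foldl_cons, ih, H]
    simp only [List.mem_cons]
    constructor
    · rintro ((hs | hq) | ⟨x', hx', hq⟩)
      · exact Or.inl hs
      · exact Or.inr ⟨x, Or.inl rfl, hq⟩
      · exact Or.inr ⟨x', Or.inr hx', hq⟩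
    · rintro (hs | ⟨x', (rfl | hx'), hq⟩)
      · exact Or.inl (Or.inl hs)
      · exact Or.inl (Or.inr hq)
      · exact Or.inr ⟨x', hx', hq⟩

lemma mem_update {α : Type} [BEq α] [LawfulBEq α] (s : PySem.Set α) (l : List α) (y : α) :
    y ∈ PySem.Set.update s l ↔ y ∈ s ∨ y ∈ l := by
  show y ∈ l.foldl PySem.Set.add s ↔ _
  rw [mem_foldl_grow (fun x s => PySem.Set.add s x) (fun x y => y = x)
    (fun x s y => PySem.Set.mem_add s x y) l s y]
  simp

lemma mem_coordsA (g : List (List Int)) (h w : Nat) (y : Nat × Nat) :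
    y ∈ pvCoordsA g h w ↔ ∃ i < h, ∃ j < w,
      2 ≤ (pvNbrsA g h w i j).length ∧ (y ∈ pvNbrsA g h w i j ∨ y = (i, j)) := by
  have inner : ∀ i (s : PySem.Set (Nat × Nat)) (y : Nat × Nat),
      y ∈ (List.range w).foldl (fun s j =>
        if 2 ≤ (pvNbrsA g h w i j).length then PySem.Set.update s (pvNbrsA g h w i j ++ [(i, j)]) else s) s
      ↔ y ∈ s ∨ ∃ j ∈ List.range w,
          2 ≤ (pvNbrsA g h w i j).length ∧ (y ∈ pvNbrsA g h w i j ∨ y = (i, j)) := by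
    intro i s y
    refine mem_foldl_grow
      (fun j s => if 2 ≤ (pvNbrsA g h w i j).length then PySem.Set.update s (pvNbrsA g h w i j ++ [(i, j)]) else s)
      (fun j y => 2 ≤ (pvNbrsA g h w i j).length ∧ (y ∈ pvNbrsA g h w i j ∨ y = (i, j)))
      ?_ _ s y
    intro j s y
    by_cases hc : 2 ≤ (pvNbrsA g h w i j).length
    · simp [hc, mem_update, or_assoc]
    · simp [hc]
  have outer := mem_foldl_grow
    (fun i s => (List.range w).foldl (fun s j =>
      if 2 ≤ (pvNbrsA g h w i j).length then PySem.Set.update s (pvNbrsA g h w i j ++ [(i, j)]) else s) s)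
    (fun i y => ∃ j ∈ List.range w, 2 ≤ (pvNbrsA g h w i j).length ∧ (y ∈ pvNbrsA g h w i j ∨ y = (i, j)))
    (fun i s y => inner i s y) (List.range h) PySem.Set.empty y
  simp only [pvCoordsA]
  rw [outer]
  simp [PySem.Set.empty, List.mem_range]

lemma mem_nbrsA (g : List (List Int)) (h w i j : Nat) (y : Nat × Nat) :
    y ∈ pvNbrsA g h w i j ↔
      ((i+1 < h ∧ pvAt g (i+1) j = pvAt g i j) ∧ y = (i+1, j)) ∨
      ((0 < i ∧ pvAt g (i-1) j = pvAt g i j) ∧ y = (i-1, j)) ∨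
      ((j+1 < w ∧ pvAt g i (j+1) = pvAt g i j) ∧ y = (i, j+1)) ∨
      ((0 < j ∧ pvAt g i (j-1) = pvAt g i j) ∧ y = (i, j-1)) := by
  have hme : ∀ (P : Prop) [Decidable P] (z y : Nat × Nat), (y ∈ (if P then [z] else [])) ↔ (P ∧ y = z) := by
    intro P _ z y; split <;> simp_all
  simp only [pvNbrsA, List.mem_append, Bool.and_eq_true, decide_eq_true_eq, beq_iff_eq, hme]
  tauto


lemma coordsA_bounds (g : List (List Int)) (h w : Nat) (y : Nat × Nat)
    (hy : y ∈ pvCoordsA g h w) : y.1 < h ∧ y.2 < w := by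
  rw [mem_coordsA] at hy
  obtain ⟨i, hih, j, hjw, _, hmem | rfl⟩ := hy
  · rw [mem_nbrsA] at hmem
    rcases hmem with ⟨⟨h1, _⟩, rfl⟩ | ⟨⟨h1, _⟩, rfl⟩ | ⟨⟨h1, _⟩, rfl⟩ | ⟨⟨h1, _⟩, rfl⟩ <;>
      constructor <;> simp <;> omega
  · exact ⟨hih, hjw⟩

-- ---- the zeroing fold, pointwise ----
lemma pvAt_zero_fold (L : List (Nat × Nat)) :
    ∀ (g : List (List Int)), (∀ p ∈ L, p.1 < g.length ∧ p.2 < (g.getD p.1 []).length) →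
    ∀ i j, pvAt (L.foldl (fun g p => pvSetA g p.1 p.2 0) g) i j
      = if (i, j) ∈ L then 0 else pvAt g i j := by
  induction L with
  | nil => intro g _ i j; simp
  | cons p L ih =>
    intro g hr i j
    obtain ⟨a, b⟩ := p
    have hhead := hr (a, b) (List.mem_cons_self)
    have htail : ∀ q ∈ L, q.1 < (pvSetA g a b 0).length ∧ q.2 < ((pvSetA g a b 0).getD q.1 []).length := by
      intro q hq
      have := hr q (List.mem_cons_of_mem _ hq)
      rw [length_pvSetA, rows_pvSetA]
      exact this
    rw [List.foldl_cons, ih _ htail i j,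
      pvAt_pvSetA g a b i j 0 hhead.1 hhead.2]
    by_cases hmem : (i, j) ∈ L
    · simp [hmem]
    · by_cases heq : i = a ∧ j = b
      · obtain ⟨rfl, rfl⟩ := heq
        simp [hmem]
      · have : (i, j) ≠ (a, b) := by
          simp only [ne_eq, Prod.mk.injEq]; exact fun hc => heq hc
        simp [hmem, this, heq]

lemma shp_zero_fold (L : List (Nat × Nat)) :
    ∀ (g : List (List Int)) (h w : Nat), Shp g h w →
      Shp (L.foldl (fun g p => pvSetA g p.1 p.2 0) g) h w := by
  induction L with
  | nil => intro g h w hs; simpa using hs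
  | cons p L ih =>
    intro g h w hs
    rw [List.foldl_cons]
    exact ih _ h w (shp_pvSetA g h w p.1 p.2 0 hs)

-- ---- centre and popped predicates ----
lemma getD_map_range {α : Type} (f : Nat → α) (n k : Nat) (d : α) :
    ((List.range n).map f).getD k d = if k < n then f k else d := by
  rw [List.getD_eq_getElem?_getD, List.getElem?_map]
  by_cases h : k < n
  · rw [List.getElem?_range h]; simp [h]
  · rw [List.getElem?_eq_none (by simpa using h)]; simp [h]

lemma isCenterB_iff (g : List (List Int)) (h w i j : Nat) :
    pvIsCenterB g h w i j = true ↔ 2 ≤ (pvNbrsA g h w i j).length := by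
  simp only [pvIsCenterB, pvNbrsA, List.length_append, decide_eq_true_eq]
  split_ifs <;> simp

lemma ctrAt_center (g : List (List Int)) (h w i j : Nat) :
    pvCtrAt ((List.range h).map (fun i => (List.range w).map (fun j => pvIsCenterB g h w i j))) i j
      = (decide (i < h) && decide (j < w) && pvIsCenterB g h w i j) := by
  simp only [pvCtrAt, getD_map_range]
  by_cases hi : i < h <;> by_cases hj : j < w <;> simp [hi, hj, getD_map_range]

lemma popped_iff_mem (g : List (List Int)) (h w i j : Nat) (hi : i < h) (hj : j < w) :
    pvPoppedB g ((List.range h).map (fun i => (List.range w).map (fun j => pvIsCenterB g h w i j))) h w i j = true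
      ↔ (i, j) ∈ pvCoordsA g h w := by
  rw [mem_coordsA]
  simp only [pvPoppedB, Bool.or_eq_true, Bool.and_eq_true, decide_eq_true_eq, beq_iff_eq,
    ctrAt_center, isCenterB_iff]
  constructor
  · rintro ((((⟨⟨_, _⟩, hC⟩ | ⟨⟨h1, ⟨h2, h3⟩, hC⟩, hv⟩) | ⟨⟨h1, ⟨h2, h3⟩, hC⟩, hv⟩) |
      ⟨⟨h1, ⟨h2, h3⟩, hC⟩, hv⟩) | ⟨⟨h1, ⟨h2, h3⟩, hC⟩, hv⟩)
    · exact ⟨i, hi, j, hj, hC, Or.inr rfl⟩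
    · refine ⟨i+1, h2, j, h3, hC, Or.inl ?_⟩
      rw [mem_nbrsA]
      exact Or.inr (Or.inl ⟨⟨by omega, by simpa using hv.symm⟩, by simp⟩)
    · refine ⟨i-1, h2, j, h3, hC, Or.inl ?_⟩
      rw [mem_nbrsA]
      refine Or.inl ⟨⟨by omega, ?_⟩, by simp [Nat.sub_add_cancel h1]⟩
      rw [Nat.sub_add_cancel h1]; exact hv.symm
    · refine ⟨i, hi, j+1, h3, hC, Or.inl ?_⟩
      rw [mem_nbrsA]
      exact Or.inr (Or.inr (Or.inr ⟨⟨by omega, by simpa using hv.symm⟩, by simp⟩))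
    · refine ⟨i, hi, j-1, h3, hC, Or.inl ?_⟩
      rw [mem_nbrsA]
      refine Or.inr (Or.inr (Or.inl ⟨⟨by omega, ?_⟩, by simp [Nat.sub_add_cancel h1]⟩))
      rw [Nat.sub_add_cancel h1]; exact hv.symm
  · rintro ⟨a, ha, b, hb, hC, hmem | heq⟩
    · rw [mem_nbrsA] at hmem
      rcases hmem with ⟨⟨h1, hv⟩, heq⟩ | ⟨⟨h1, hv⟩, heq⟩ | ⟨⟨h1, hv⟩, heq⟩ | ⟨⟨h1, hv⟩, heq⟩ <;>
        rw [Prod.mk.injEq] at heq <;> obtain ⟨rfl, rfl⟩ := heq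
      · -- (i,j) = (a+1,b): use the `i-1` disjunct of popped
        refine Or.inl (Or.inl (Or.inr ⟨⟨by omega, ⟨by simpa using ha, hb⟩, by simpa using hC⟩, ?_⟩))
        simpa using hv.symm
      · -- (i,j) = (a-1,b): use the `i+1` disjunct of popped
        have hai : a - 1 + 1 = a := Nat.sub_add_cancel h1
        refine Or.inl (Or.inl (Or.inl (Or.inr ⟨⟨by omega, ⟨by omega, hb⟩, by rw [hai]; exact hC⟩, ?_⟩)))
        rw [hai]; exact hv.symm
      · -- (i,j) = (a,b+1): use the `j-1` disjunct of popped
        refine Or.inr ⟨⟨by omega, ⟨ha, by simpa using hb⟩, by simpa using hC⟩, ?_⟩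
        simpa using hv.symm
      · -- (i,j) = (a,b-1): use the `j+1` disjunct of popped
        have hbj : b - 1 + 1 = b := Nat.sub_add_cancel h1
        refine Or.inl (Or.inr ⟨⟨by omega, ⟨ha, by omega⟩, by rw [hbj]; exact hC⟩, ?_⟩)
        rw [hbj]; exact hv.symm
    · rw [Prod.mk.injEq] at heq; obtain ⟨rfl, rfl⟩ := heq
      exact Or.inl (Or.inl (Or.inl (Or.inl ⟨⟨ha, hb⟩, hC⟩)))

lemma wUp_le (c : List Int) (i : Nat) : wUp c i ≤ i := by
  induction i with
  | zero => simp [wUp]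
  | succ k ih =>
    rw [wUp]
    split
    · omega
    · omega

lemma pvWhileUpA_eq (g : List (List Int)) (col i : Nat) :
    pvWhileUpA g col i = wUp (colOf g col) i := by
  induction i with
  | zero => rfl
  | succ k ih =>
    rw [pvWhileUpA, wUp, colOf_getD, ih]

lemma colOf_pvSetA_same (g : List (List Int)) (i j : Nat) (v : Int)
    (hi : i < g.length) (hj : j < (g.getD i []).length) :
    colOf (pvSetA g i j v) j = (colOf g j).set i v := by
  rw [getD_eq_getElem_of_lt _ _ hi] at hj
  apply List.ext_getElem?
  intro k
  simp only [colOf, pvSetA, List.getElem?_map]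
  by_cases hk : k = i
  · subst hk
    rw [List.getElem?_set_self (by simpa using hi), List.getElem?_set_self (by simpa using hi)]
    simp only [Option.map_some]
    congr 1
    rw [getD_eq_getElem_of_lt _ _ hi, getD_eq_getElem_of_lt _ _ (by simpa using hj)]
    simp [List.getElem_set_self, hj]
  · rw [List.getElem?_set_ne (by omega), List.getElem?_set_ne (by omega), List.getElem?_map]

lemma colOf_pvSetA_ne (g : List (List Int)) (i j j' : Nat) (v : Int) (hne : j' ≠ j) :
    colOf (pvSetA g i j v) j' = colOf g j' := by
  apply List.ext_getElem?
  intro k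
  simp only [colOf, pvSetA, List.getElem?_map]
  by_cases hk : k = i
  · subst hk
    by_cases hklen : k < g.length
    · rw [List.getElem?_set_self (by simpa using hklen), List.getElem?_eq_getElem hklen]
      simp only [Option.map_some]
      congr 1
      rw [getD_eq_getElem_of_lt _ _ hklen]
      rw [List.getD_eq_getElem?_getD, List.getD_eq_getElem?_getD, List.getElem?_set_ne (by omega)]
    · rw [List.getElem?_set]
      simp [hklen]
  · rw [List.getElem?_set_ne (by omega)]

lemma row_len (g : List (List Int)) (h w k : Nat) (hs : Shp g h w) (hk : k < h) :
    (g.getD k []).length = w := by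
  obtain ⟨h1, h2⟩ := hs
  have hk' : k < g.length := by omega
  rw [getD_eq_getElem_of_lt _ _ hk']
  exact h2 _ (List.getElem_mem hk')

lemma colOf_gravStep_same (g : List (List Int)) (h w col row : Nat)
    (hs : Shp g h w) (hrow : row < h) (hcol : col < w) :
    colOf (pvGravStepA col g row) col = stepC (colOf g col) row := by
  have hlen : g.length = h := hs.1
  rw [pvGravStepA, stepC, colOf_getD]
  split
  case isFalse => rfl
  case isTrue hz =>
    rw [pvWhileUpA_eq]
    set i := wUp (colOf g col) row with hidef
    have hile : i ≤ row := wUp_le _ _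
    have hrowlen : col < (g.getD row []).length := by rw [row_len g h w row hs hrow]; exact hcol
    have hg' := shp_pvSetA g h w row col (pvAt g i col) hs
    have hilen : col < ((pvSetA g row col (pvAt g i col)).getD i []).length := by
      rw [row_len _ h w i hg' (by omega)]; exact hcol
    rw [colOf_pvSetA_same _ i col 0 (by rw [length_pvSetA]; omega) hilen,
      colOf_pvSetA_same g row col _ (by omega) hrowlen, colOf_getD]

lemma colOf_gravStep_ne (g : List (List Int)) (h w col row j : Nat)
    (hs : Shp g h w) (hrow : row < h) (hcol : col < w) (hne : j ≠ col) :
    colOf (pvGravStepA col g row) j = colOf g j := by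
  rw [pvGravStepA]
  split
  · rw [colOf_pvSetA_ne _ _ _ _ _ hne, colOf_pvSetA_ne _ _ _ _ _ hne]
  · rfl

lemma shp_gravStep (g : List (List Int)) (h w col row : Nat) (hs : Shp g h w) :
    Shp (pvGravStepA col g row) h w := by
  rw [pvGravStepA]
  split
  · exact shp_pvSetA _ h w _ _ _ (shp_pvSetA _ h w _ _ _ hs)
  · exact hs

lemma inner_fold_cols (h w col : Nat) (hcol : col < w) :
    ∀ (L : List Nat) (g : List (List Int)), Shp g h w → (∀ r ∈ L, r < h) →
      Shp (L.foldl (pvGravStepA col) g) h w ∧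
      colOf (L.foldl (pvGravStepA col) g) col = L.foldl stepC (colOf g col) ∧
      ∀ j, j ≠ col → colOf (L.foldl (pvGravStepA col) g) j = colOf g j := by
  intro L
  induction L with
  | nil => intro g hs _; exact ⟨hs, rfl, fun _ _ => rfl⟩
  | cons r L ih =>
    intro g hs hb
    have hr : r < h := hb r List.mem_cons_self
    have hb' : ∀ r' ∈ L, r' < h := fun r' hr' => hb r' (List.mem_cons_of_mem _ hr')
    have hstep := shp_gravStep g h w col r hs
    obtain ⟨s1, s2, s3⟩ := ih (pvGravStepA col g r) hstep hb'
    refine ⟨s1, ?_, ?_⟩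
    · rw [List.foldl_cons, s2, colOf_gravStep_same g h w col r hs hr hcol, List.foldl_cons]
    · intro j hj
      rw [List.foldl_cons, s3 j hj, colOf_gravStep_ne g h w col r j hs hr hcol hj]

lemma outer_fold_cols (h w : Nat) :
    ∀ (L : List Nat) (g : List (List Int)), Shp g h w → L.Nodup → (∀ c ∈ L, c < w) →
      Shp (L.foldl (fun g col => ((List.range h).reverse).foldl (pvGravStepA col) g) g) h w ∧
      ∀ j, colOf (L.foldl (fun g col => ((List.range h).reverse).foldl (pvGravStepA col) g) g) j
        = if j ∈ L then FC (colOf g j) h else colOf g j := by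
  intro L
  induction L with
  | nil => intro g hs _ _; exact ⟨hs, fun j => by simp⟩
  | cons c L ih =>
    intro g hs hnd hb
    have hc : c < w := hb c List.mem_cons_self
    have hb' : ∀ c' ∈ L, c' < w := fun c' hc' => hb c' (List.mem_cons_of_mem _ hc')
    have hrange : ∀ r ∈ (List.range h).reverse, r < h := by
      intro r hr; rw [List.mem_reverse, List.mem_range] at hr; exact hr
    obtain ⟨s1, s2, s3⟩ := inner_fold_cols h w c hc (List.range h).reverse g hs hrange
    have hnd' : L.Nodup := (List.nodup_cons.mp hnd).2
    have hcL : c ∉ L := (List.nodup_cons.mp hnd).1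
    obtain ⟨t1, t2⟩ := ih _ s1 hnd' hb'
    refine ⟨t1, ?_⟩
    intro j
    rw [List.foldl_cons, t2 j]
    by_cases hjL : j ∈ L
    · have hjc : j ≠ c := fun hh => hcL (hh ▸ hjL)
      rw [if_pos hjL, if_pos (List.mem_cons_of_mem _ hjL), s3 j hjc]
    · by_cases hjc : j = c
      · subst hjc
        rw [if_neg hjL, if_pos List.mem_cons_self, s2]
        rfl
      · rw [if_neg hjL, if_neg (by simp [hjc, hjL]), s3 j hjc]

-- ---- the pure column loop equals zero-compaction ----
lemma length_stepC (c : List Int) (r : Nat) : (stepC c r).length = c.length := by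
  rw [stepC]
  split <;> simp

lemma wUp_append (l t : List Int) (k : Nat) (hk : k < l.length) :
    wUp (l ++ t) k = wUp l k := by
  induction k with
  | zero => rfl
  | succ m ih =>
    rw [wUp, wUp, List.getD_append _ _ _ _ hk]
    split
    · exact ih (by omega)
    · rfl

lemma stepC_append (l t : List Int) (m : Nat) (hm : m < l.length) :
    stepC (l ++ t) m = stepC l m ++ t := by
  have hw : wUp l m < l.length := lt_of_le_of_lt (wUp_le l m) hm
  rw [stepC, stepC, List.getD_append _ _ _ _ hm, wUp_append _ _ _ hm,
    List.getD_append _ _ _ _ hw]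
  split
  · rw [List.set_append, if_pos hm, List.set_append, if_pos (by rw [List.length_set]; exact hw)]
  · rfl

lemma FC_succ (c : List Int) (m : Nat) : FC c (m+1) = FC (stepC c m) m := by
  rw [FC, FC, List.range_succ, List.reverse_append]
  simp

lemma FC_append : ∀ (m : Nat) (l t : List Int), m ≤ l.length →
    FC (l ++ t) m = FC l m ++ t := by
  intro m
  induction m with
  | zero => intro l t _; rfl
  | succ m ih =>
    intro l t hm
    rw [FC_succ, FC_succ, stepC_append _ _ _ (by omega),
      ih _ _ (by rw [length_stepC]; omega)]

lemma stepC_all_zero (c : List Int) (r : Nat) (hz : ∀ v ∈ c, v = 0) :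
    ∀ v ∈ stepC c r, v = 0 := by
  rw [stepC]
  split
  · intro v hv
    have hd : c.getD (wUp c r) 0 = 0 := by
      by_cases hlt : wUp c r < c.length
      · rw [getD_eq_getElem_of_lt _ _ hlt]; exact hz _ (List.getElem_mem hlt)
      · rw [List.getD_eq_getElem?_getD, List.getElem?_eq_none (by omega)]; rfl
    rcases List.mem_or_eq_of_mem_set hv with hv' | rfl
    · rcases List.mem_or_eq_of_mem_set hv' with hv'' | rfl
      · exact hz _ hv''
      · exact hd
    · rfl
  · exact hz

lemma FC_all_zero (m : Nat) : ∀ (c : List Int), (∀ v ∈ c, v = 0) →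
    (∀ v ∈ FC c m, v = 0) ∧ (FC c m).length = c.length := by
  induction m with
  | zero => intro c hz; exact ⟨hz, rfl⟩
  | succ m ih =>
    intro c hz
    rw [FC_succ]
    obtain ⟨a1, a2⟩ := ih (stepC c m) (stepC_all_zero c m hz)
    exact ⟨a1, by rw [a2, length_stepC]⟩

lemma exists_last_nonzero (l : List Int) (hne : nzf l ≠ []) :
    ∃ l1 y l2, l = l1 ++ y :: l2 ∧ (y == 0) = false ∧ ∀ v ∈ l2, v = 0 := by
  induction l using List.reverseRecOn with
  | nil => simp [nzf] at hne
  | append_singleton l x ih =>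
    by_cases hx : (x == 0) = false
    · exact ⟨l, x, [], by simp, hx, by simp⟩
    · have hx0 : x = 0 := by
        have : (x == 0) = true := by
          cases hxe : (x == 0)
          · exact absurd hxe hx
          · rfl
        simpa using this
      subst hx0
      have hne' : nzf l ≠ [] := by
        intro hemp
        apply hne
        rw [nzf, List.filter_append, ← nzf, hemp]
        simp [nzf]
      obtain ⟨l1, y, l2, rfl, hy, hz⟩ := ih hne'
      refine ⟨l1, y, l2 ++ [0], by simp, hy, ?_⟩
      intro v hv
      rcases List.mem_append.mp hv with hv' | hv'
      · exact hz v hv'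
      · simpa using hv'

lemma wUp_skip (c : List Int) : ∀ (i m : Nat), m ≤ i →
    (∀ k, m < k → k ≤ i → c.getD k 0 = 0) → wUp c i = wUp c m := by
  intro i
  induction i with
  | zero => intro m hm _; interval_cases m; rfl
  | succ n ih =>
    intro m hm hz
    by_cases hme : m = n + 1
    · subst hme; rfl
    · have hmn : m ≤ n := by omega
      have h0 := hz (n+1) (by omega) (by omega)
      rw [wUp, h0]
      simp only [beq_self_eq_true, if_true]
      exact ih m hmn (fun k h1 h2 => hz k h1 (by omega))

lemma wUp_char (l1 : List Int) (y : Int) (t : List Int) (hy : (y == 0) = false)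
    (ht : ∀ v ∈ t, v = 0) :
    wUp (l1 ++ y :: t) (l1.length + t.length) = l1.length := by
  have hskip := wUp_skip (l1 ++ y :: t) (l1.length + t.length) l1.length (by omega) ?_
  · rw [hskip]
    rcases l1 with _ | ⟨a, l1'⟩
    · rfl
    · have hlen : (a :: l1').length = l1'.length + 1 := rfl
      rw [hlen, wUp]
      have hget : ((a :: l1') ++ y :: t).getD (l1'.length + 1) 0 = y := by
        rw [List.getD_append_right _ _ _ _ (by simp)]
        simp
      rw [hget, hy]
      simp
  · intro k hk1 hk2
    rw [List.getD_append_right _ _ _ _ (by omega)]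
    have hd : 1 ≤ k - l1.length := by omega
    cases hdk : k - l1.length with
    | zero => omega
    | succ d =>
      simp only [List.getD_cons_succ]
      have hdt : d < t.length := by omega
      rw [getD_eq_getElem_of_lt _ _ hdt]
      exact ht _ (List.getElem_mem hdt)

lemma nzf_all_zero (t : List Int) (ht : ∀ v ∈ t, v = 0) : nzf t = [] := by
  rw [nzf, List.filter_eq_nil_iff]
  intro a ha
  simp [ht a ha]

lemma zcomp_append_nonzero (l : List Int) (x : Int) (hx : (x == 0) = false) :
    zcomp (l ++ [x]) = zcomp l ++ [x] := by
  have hnz : nzf (l ++ [x]) = nzf l ++ [x] := by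
    rw [nzf, List.filter_append, ← nzf]
    congr 1
    simp [nzf, hx]
  rw [zcomp, zcomp, hnz]
  have hk : (nzf l).length ≤ l.length := List.length_filter_le _ _
  simp only [List.length_append, List.length_cons, List.length_nil]
  rw [show l.length + 1 - ((nzf l).length + 1) = l.length - (nzf l).length by omega]
  simp [List.append_assoc]

lemma FC_eq_zcomp : ∀ (n : Nat) (c : List Int), c.length = n → FC c n = zcomp c := by
  intro n
  induction n with
  | zero =>
    intro c hc
    rw [List.length_eq_zero_iff] at hc
    subst hc
    rfl
  | succ n ih =>
    intro c hc
    have hcne : c ≠ [] := by intro h; subst h; simp at hc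
    obtain ⟨l, x, hlx⟩ : ∃ l x, c = l ++ [x] :=
      ⟨c.dropLast, c.getLast hcne, (List.dropLast_concat_getLast hcne).symm⟩
    subst hlx
    have hl : l.length = n := by simpa using hc
    by_cases hx : (x == 0) = false
    · -- last cell non-zero: the first step is a no-op
      have hget : (l ++ [x]).getD n 0 = x := by
        rw [List.getD_append_right _ _ _ _ (by omega)]
        simp [hl]
      have hstep : stepC (l ++ [x]) n = l ++ [x] := by
        rw [stepC, hget, hx]
        simp
      rw [FC_succ, hstep, FC_append n l [x] (by omega), ih l hl, zcomp_append_nonzero l x hx]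
    · have hx0 : x = 0 := by
        cases hxe : (x == 0)
        · exact absurd hxe hx
        · simpa using hxe
      subst hx0
      by_cases hnz : nzf l = []
      · -- the whole column is zero: every step keeps it all-zero
        have hall : ∀ v ∈ l ++ [(0 : Int)], v = 0 := by
          intro v hv
          rcases List.mem_append.mp hv with hv' | hv'
          · rw [nzf, List.filter_eq_nil_iff] at hnz
            have := hnz v hv'
            simpa using this
          · simpa using hv'
        obtain ⟨a1, a2⟩ := FC_all_zero (n+1) (l ++ [0]) hall
        have hfc : FC (l ++ [0]) (n+1) = List.replicate (n+1) 0 := by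
          rw [List.eq_replicate_iff]
          refine ⟨by rw [a2]; simpa using hc, a1⟩
        rw [hfc, zcomp, nzf_all_zero _ hall]
        simp [hc]
      · -- there is a last non-zero cell at index |l1|: the step moves it to the bottom
        obtain ⟨l1, y, l2, rfl, hy, hz⟩ := exists_last_nonzero l hnz
        have hzz : ∀ v ∈ l2 ++ [(0 : Int)], v = 0 := by
          intro v hv
          rcases List.mem_append.mp hv with hv' | hv'
          · exact hz v hv'
          · simpa using hv'
        have hassoc : (l1 ++ y :: l2) ++ [(0 : Int)] = l1 ++ y :: (l2 ++ [0]) := by simp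
        have hwup : wUp ((l1 ++ y :: l2) ++ [0]) n = l1.length := by
          rw [hassoc]
          have hn : n = l1.length + (l2 ++ [(0 : Int)]).length := by
            simp only [List.length_append, List.length_cons, List.length_nil] at hl ⊢
            omega
          rw [hn]
          exact wUp_char l1 y (l2 ++ [0]) hy hzz
        have hgetn : ((l1 ++ y :: l2) ++ [(0 : Int)]).getD n 0 = 0 := by
          rw [List.getD_append_right _ _ _ _ (by omega)]
          simp [hl]
        have hgety : ((l1 ++ y :: l2) ++ [(0 : Int)]).getD l1.length 0 = y := by
          rw [hassoc, List.getD_append_right _ _ _ _ (le_refl _)]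
          simp
        have hstep : stepC ((l1 ++ y :: l2) ++ [0]) n = (l1 ++ 0 :: l2) ++ [y] := by
          rw [stepC, hgetn, hwup, hgety]
          simp only [beq_self_eq_true, if_true]
          rw [List.set_append, if_neg (by omega)]
          rw [show n - (l1 ++ y :: l2).length = 0 by omega]
          rw [show ([(0 : Int)].set 0 y) = [y] from rfl]
          rw [List.set_append, if_pos (by simp only [List.length_append, List.length_cons] at hl ⊢; omega)]
          congr 1
          rw [List.set_append, if_neg (by omega)]
          rw [show l1.length - l1.length = 0 by omega]
          rfl
        have hlen' : (l1 ++ 0 :: l2).length = n := by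
          simp only [List.length_append, List.length_cons, List.length_nil] at hl ⊢
          omega
        rw [FC_succ, hstep, FC_append n _ [y] (by omega), ih _ hlen']
        -- zcomp (l1 ++ 0 :: l2) ++ [y] = zcomp ((l1 ++ y :: l2) ++ [0])
        have hnzf1 : nzf (l1 ++ 0 :: l2) = nzf l1 := by
          rw [nzf, List.filter_append, ← nzf, ← nzf]
          rw [show nzf (0 :: l2) = nzf l2 by simp [nzf]]
          rw [nzf_all_zero l2 hz]
          simp
        have hnzf2 : nzf ((l1 ++ y :: l2) ++ [0]) = nzf l1 ++ [y] := by
          rw [nzf, List.filter_append, List.filter_append, ← nzf, ← nzf, ← nzf]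
          rw [show nzf [(0 : Int)] = [] by simp [nzf]]
          rw [show nzf (y :: l2) = y :: nzf l2 by simp [nzf, hy]]
          rw [nzf_all_zero l2 hz]
          simp
        rw [zcomp, zcomp, hnzf1, hnzf2, hlen']
        have hk : (nzf l1).length ≤ n := by
          have h1 : (nzf l1).length ≤ l1.length := List.length_filter_le _ _
          simp only [List.length_append, List.length_cons, List.length_nil] at hl
          omega
        simp only [List.length_append, List.length_cons, List.length_nil, List.append_assoc]
        congr 2
        simp only [List.length_append, List.length_cons, List.length_nil] at hl
        omega

-- ---- assembly ----
theorem bubblesSolution_spec : Claim_equal_bubblesSolution := by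
  intro bubbles _ hpre
  show bubblesSolution bubbles = bubblesSolution_alt bubbles
  obtain ⟨hne, hrows⟩ := hpre
  -- abbreviations matching the two ports
  set h := bubbles.length with hh
  set w := (bubbles.getD 0 []).length with hw
  have hshp : Shp bubbles h w := ⟨rfl, hrows⟩
  set center := (List.range h).map (fun i => (List.range w).map (fun j => pvIsCenterB bubbles h w i j)) with hcenter
  set gB := (List.range h).map (fun i => (List.range w).map (fun j =>
      if pvPoppedB bubbles center h w i j then 0 else pvAt bubbles i j)) with hgB
  set g1 := (pvCoordsA bubbles h w).foldl (fun g p => pvSetA g p.1 p.2 0) bubbles with hg1def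
  have hA : bubblesSolution bubbles
      = (List.range w).foldl (fun g col => ((List.range h).reverse).foldl (pvGravStepA col) g) g1 := rfl
  set cols := (List.range w).map (fun j =>
      let kept := ((List.range h).map (fun i => pvAt gB i j)).filter (fun v => !(v == 0))
      List.replicate (h - kept.length) 0 ++ kept) with hcols
  have hB : bubblesSolution_alt bubbles
      = (List.range h).map (fun i => (List.range w).map (fun j => (cols.getD j []).getD i 0)) := rfl
  -- Phase 1: the zeroed grid equals B's popped grid
  have hbounds : ∀ p ∈ pvCoordsA bubbles h w, p.1 < bubbles.length ∧ p.2 < (bubbles.getD p.1 []).length := by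
    intro p hp
    obtain ⟨h1, h2⟩ := coordsA_bounds bubbles h w p hp
    refine ⟨h1, ?_⟩
    rw [row_len bubbles h w p.1 hshp h1]
    exact h2
  have hshp1 : Shp g1 h w := shp_zero_fold _ bubbles h w hshp
  have hg1At : ∀ i j, i < h → j < w → pvAt g1 i j = if pvPoppedB bubbles center h w i j then 0 else pvAt bubbles i j := by
    intro i j hi hj
    rw [hg1def, pvAt_zero_fold _ bubbles hbounds i j, hcenter]
    by_cases hp : (i, j) ∈ pvCoordsA bubbles h w
    · rw [if_pos hp, if_pos ((popped_iff_mem bubbles h w i j hi hj).mpr hp)]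
    · rw [if_neg hp, if_neg (fun hc => hp ((popped_iff_mem bubbles h w i j hi hj).mp hc))]
  have hgBlen : gB.length = h := by rw [hgB]; simp
  have hgBrow : ∀ i, i < h → gB.getD i [] = (List.range w).map (fun j =>
      if pvPoppedB bubbles center h w i j then 0 else pvAt bubbles i j) := by
    intro i hi
    rw [hgB, getD_map_range, if_pos hi]
  have hgBAt : ∀ i j, i < h → j < w → pvAt gB i j = if pvPoppedB bubbles center h w i j then 0 else pvAt bubbles i j := by
    intro i j hi hj
    rw [pvAt, hgBrow i hi, getD_map_range, if_pos hj]
  have hg1gB : g1 = gB := by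
    apply List.ext_getElem (by rw [hshp1.1, hgBlen])
    intro i hi1 hi2
    have hih : i < h := by rw [← hshp1.1]; exact hi1
    have hrow1 : g1[i].length = w := hshp1.2 _ (List.getElem_mem hi1)
    have hrow2 : gB[i].length = w := by
      have : gB[i] = (List.range w).map (fun j => if pvPoppedB bubbles center h w i j then 0 else pvAt bubbles i j) := by
        rw [← getD_eq_getElem_of_lt gB [] hi2]
        exact hgBrow i hih
      rw [this]; simp
    apply List.ext_getElem (by rw [hrow1, hrow2])
    intro j hj1 hj2
    have hjw : j < w := by rw [← hrow1]; exact hj1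
    rw [← pvAt_eq_getElem g1 i j hi1 hj1, ← pvAt_eq_getElem gB i j hi2 hj2,
      hg1At i j hih hjw, hgBAt i j hih hjw]
  -- Phase 2: gravity
  obtain ⟨hshpG, hGcols⟩ := outer_fold_cols h w (List.range w) g1 hshp1 List.nodup_range
    (fun c hc => List.mem_range.mp hc)
  set G := (List.range w).foldl (fun g col => ((List.range h).reverse).foldl (pvGravStepA col) g) g1 with hGdef
  have hGcol : ∀ j, j < w → colOf G j = zcomp (colOf g1 j) := by
    intro j hj
    rw [hGcols j, if_pos (List.mem_range.mpr hj)]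
    exact FC_eq_zcomp h (colOf g1 j) (by rw [length_colOf, hshp1.1])
  -- B's columns
  have hcolsj : ∀ j, j < w → cols.getD j [] = zcomp (colOf gB j) := by
    intro j hj
    rw [hcols, getD_map_range, if_pos hj]
    have hmap : (List.range h).map (fun i => pvAt gB i j) = colOf gB j := by
      rw [colOf, hgB, List.map_map]
      apply List.map_congr_left
      intro i hi
      rw [List.mem_range] at hi
      simp only [Function.comp_apply]
      rw [pvAt, getD_map_range, if_pos hi]
    rw [hmap, zcomp, nzf]
    have : (colOf gB j).length = h := by rw [length_colOf, hgBlen]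
    rw [this]
  -- final extensionality
  rw [hA, hB]
  apply List.ext_getElem (by rw [hshpG.1]; simp)
  intro i hi1 hi2
  have hih : i < h := by rw [← hshpG.1]; exact hi1
  have hrowG : G[i].length = w := hshpG.2 _ (List.getElem_mem hi1)
  have hrowR : ((List.range h).map (fun i => (List.range w).map (fun j => (cols.getD j []).getD i 0)))[i]
      = (List.range w).map (fun j => (cols.getD j []).getD i 0) := by
    rw [← getD_eq_getElem_of_lt _ [] hi2, getD_map_range, if_pos hih]
  apply List.ext_getElem (by rw [hrowG, hrowR]; simp)
  intro j hj1 hj2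
  have hjw : j < w := by rw [← hrowG]; exact hj1
  have hRij : ((List.range h).map (fun i => (List.range w).map (fun j => (cols.getD j []).getD i 0)))[i][j]
      = (cols.getD j []).getD i 0 := by
    have h1 := hrowR
    rw [← getD_eq_getElem_of_lt _ 0 hj2]
    rw [h1, getD_map_range, if_pos hjw]
  rw [hRij, ← pvAt_eq_getElem G i j hi1 hj1, ← colOf_getD, hGcol j hjw,
    hcolsj j hjw, hg1gB]
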